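-- pv_equiv track=rewrite | github.com/Zuluke/Deep-Learning | project/scripts/_analysis_common.py | count_hadamards_near_boundaries
-- ===== SOURCE A (Python) =====
-- CLIFFORD_GATES = {"h", "s", "sdg", "x", "y", "z", "cx"}
--
-- NON_CLIFFORD_GATES = {"t", "tdg"}
--
-- def _gate_class(name: str) -> str | None:
--     if name in CLIFFORD_GATES:
--         return "C"
--     if name in NON_CLIFFORD_GATES:
--         return "NC"
--     return None
--
-- def count_hadamards_near_boundaries(sequence: list[str], window: int) -> int:
--     boundaries = [
--         index
--         for index in range(len(sequence) - 1)
--         if _gate_class(sequence[index]) != _gate_class(sequence[index + 1])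
--     ]
--     if not boundaries:
--         return 0
--     hadamard_indices: set[int] = set()
--     for boundary in boundaries:
--         for position, gate_name in enumerate(sequence):
--             if gate_name != "h":
--                 continue
--             if min(abs(position - boundary), abs(position - (boundary + 1))) <= window:
--                 hadamard_indices.add(position)
--     return len(hadamard_indices)
-- ===== SOURCE B (Python) =====
-- CLIFFORD_GATES = {"h", "s", "sdg", "x", "y", "z", "cx"}
--
-- NON_CLIFFORD_GATES = {"t", "tdg"}
--
-- def _gate_class(name):
--     if name in CLIFFORD_GATES:
--         return "C"
--     if name in NON_CLIFFORD_GATES: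
--         return "NC"
--     return None
--
-- def count_hadamards_near_boundaries(sequence, window):
--     # One linear pass with a monotone boundary pointer instead of a
--     # boundary x position double loop with a dedup set.
--     classes = [_gate_class(g) for g in sequence]
--     boundaries = [i for i in range(len(sequence) - 1) if classes[i] != classes[i + 1]]
--     m = len(boundaries)
--     count = 0
--     j = 0
--     for position, gate_name in enumerate(sequence):
--         # an h at `position` is near boundary b iff position-1-window <= b <= position+window
--         while j < m and boundaries[j] < position - 1 - window:
--             j += 1
--         if gate_name == "h" and j < m and boundaries[j] <= position + window:
--             count += 1
--     return count
-- ===== Notes on version B (the rewrite author's own statement) =====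
-- stated objective: alternative
-- what changed: Replaces A's boundary-by-position double loop with a dedup set by a single linear pass over the sequence using a monotone two-pointer into the (sorted) boundary list: the near-boundary test becomes an interval check b in [p-1-window, p+window]; O(n) vs A's O(n*m) when there are m>0 boundaries, though a timing run's inputs (few boundaries) show no measured speed-up.
import Mathlib
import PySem

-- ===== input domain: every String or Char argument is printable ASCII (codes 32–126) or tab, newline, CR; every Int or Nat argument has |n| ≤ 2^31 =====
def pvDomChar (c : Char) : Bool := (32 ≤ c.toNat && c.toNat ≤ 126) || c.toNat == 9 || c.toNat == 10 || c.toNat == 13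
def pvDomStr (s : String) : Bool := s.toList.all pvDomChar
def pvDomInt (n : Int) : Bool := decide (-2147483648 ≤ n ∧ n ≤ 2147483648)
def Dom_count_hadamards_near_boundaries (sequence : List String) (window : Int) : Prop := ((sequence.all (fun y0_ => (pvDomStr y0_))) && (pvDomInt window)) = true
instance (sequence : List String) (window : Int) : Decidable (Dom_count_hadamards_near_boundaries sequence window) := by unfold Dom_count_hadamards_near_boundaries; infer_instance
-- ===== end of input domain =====

-- B replaces A's boundary×position double loop (with a dedup set) by one linear pass
-- with a monotone two-pointer into the sorted boundary list (objective: alternative algorithm).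

-- ===== PORT A =====
def pvGateClassA (name : String) : Option String :=
  if ["h", "s", "sdg", "x", "y", "z", "cx"].contains name then some "C"
  else if ["t", "tdg"].contains name then some "NC"
  else none

def count_hadamards_near_boundaries (sequence : List String) (window : Int) : Int :=
  let boundaries := (PySem.List.pyRange 0 ((sequence.length : Int) - 1)).filter
    (fun index => pvGateClassA (PySem.List.pyGetD sequence index "") !=
                  pvGateClassA (PySem.List.pyGetD sequence (index + 1) ""))
  if boundaries = [] then 0
  else
    let hadamard_indices : PySem.Set Int :=
      boundaries.foldl (fun s boundary =>
        (PySem.List.enumerate sequence).foldl (fun s pg =>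
          if pg.2 ≠ "h" then s
          else if min |pg.1 - boundary| |pg.1 - (boundary + 1)| ≤ window
            then PySem.Set.add s pg.1 else s) s) PySem.Set.empty
    (hadamard_indices.length : Int)

-- ===== PORT B =====
def pvGateClassB (name : String) : Option String :=
  if ["h", "s", "sdg", "x", "y", "z", "cx"].contains name then some "C"
  else if ["t", "tdg"].contains name then some "NC"
  else none

-- the 'while j < m and boundaries[j] < t: j += 1' pointer advance of Source B
def pvAdvance (bs : List Int) (t : Int) (j : Nat) : Nat :=
  if h : j < bs.length then
    if bs[j] < t then pvAdvance bs t (j + 1) else j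
  else j
termination_by bs.length - j

def count_hadamards_near_boundaries_alt (sequence : List String) (window : Int) : Int :=
  let classes := sequence.map pvGateClassB
  let boundaries := (PySem.List.pyRange 0 ((sequence.length : Int) - 1)).filter
    (fun i => PySem.List.pyGetD classes i none != PySem.List.pyGetD classes (i + 1) none)
  let m := boundaries.length
  let res := (PySem.List.enumerate sequence).foldl (fun st pg =>
    let j := pvAdvance boundaries (pg.1 - 1 - window) st.2
    if pg.2 == "h" && decide (j < m) &&
       decide (PySem.List.pyGetD boundaries (j : Int) 0 ≤ pg.1 + window)
    then (st.1 + 1, j) else (st.1, j)) ((0 : Int), (0 : Nat))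
  res.1

-- ===== PRECONDITION & SPEC =====
def Spec_count_hadamards_near_boundaries (sequence : List String) (window : Int) (out : Int) : Prop := out = count_hadamards_near_boundaries_alt sequence window
instance (sequence : List String) (window : Int) (out : Int) : Decidable (Spec_count_hadamards_near_boundaries sequence window out) := by unfold Spec_count_hadamards_near_boundaries; infer_instance

-- ===== CLAIM (what is proved, stated in full; the proofs are below) =====
def Claim_equal_count_hadamards_near_boundaries : Prop := ∀ (sequence : List String) (window : Int), Dom_count_hadamards_near_boundaries sequence window → Spec_count_hadamards_near_boundaries sequence window (count_hadamards_near_boundaries sequence window)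

-- ===== LEMMAS AND PROOFS =====

-- the "h at position pg.1 is near boundary b" predicate both programs decide
def pvQ (bs : List Int) (w : Int) (pg : Int × String) : Bool :=
  pg.2 == "h" && bs.any (fun b => decide (b - w ≤ pg.1) && decide (pg.1 ≤ b + 1 + w))

theorem pv_near_iff (p b w : Int) :
    min |p - b| |p - (b + 1)| ≤ w ↔ b - w ≤ p ∧ p ≤ b + 1 + w := by
  rw [min_le_iff, abs_le, abs_le]; omega

-- B's boundary list equals A's boundary list
theorem pv_bs_eq (sequence : List String) :
    (PySem.List.pyRange 0 ((sequence.length : Int) - 1)).filter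
      (fun i => PySem.List.pyGetD (sequence.map pvGateClassB) i none !=
                PySem.List.pyGetD (sequence.map pvGateClassB) (i + 1) none)
    = (PySem.List.pyRange 0 ((sequence.length : Int) - 1)).filter
      (fun index => pvGateClassA (PySem.List.pyGetD sequence index "") !=
                    pvGateClassA (PySem.List.pyGetD sequence (index + 1) "")) := by
  apply List.filter_congr
  intro i _
  rw [show (none : Option String) = pvGateClassB "" from rfl,
      PySem.List.pyGetD_map pvGateClassB sequence i "",
      PySem.List.pyGetD_map pvGateClassB sequence (i + 1) ""]
  rfl

-- ----- A side: the nested set-building fold counts the positions satisfying pvQ -----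

theorem pv_mem_innerA (window b : Int) (l : List (Int × String)) (s : PySem.Set Int) (x : Int) :
    (x ∈ l.foldl (fun s pg =>
        if pg.2 ≠ "h" then s
        else if min |pg.1 - b| |pg.1 - (b + 1)| ≤ window
          then PySem.Set.add s pg.1 else s) s) ↔
    x ∈ s ∨ ∃ pg ∈ l, pg.2 = "h" ∧ min |pg.1 - b| |pg.1 - (b + 1)| ≤ window ∧ x = pg.1 := by
  induction l generalizing s with
  | nil => simp
  | cons a l ih =>
    simp only [List.foldl_cons, ih, List.mem_cons]
    split_ifs with h1 h2
    · constructor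
      · rintro (h | ⟨pg, hm, rest⟩)
        · exact Or.inl h
        · exact Or.inr ⟨pg, Or.inr hm, rest⟩
      · rintro (h | ⟨pg, (rfl | hpg), hh, hc, rfl⟩)
        · exact Or.inl h
        · exact absurd hh h1
        · exact Or.inr ⟨pg, hpg, hh, hc, rfl⟩
    · rw [PySem.Set.mem_add]
      rw [not_not] at h1
      constructor
      · rintro ((h | rfl) | ⟨pg, hm, rest⟩)
        · exact Or.inl h
        · exact Or.inr ⟨a, Or.inl rfl, h1, h2, rfl⟩
        · exact Or.inr ⟨pg, Or.inr hm, rest⟩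
      · rintro (h | ⟨pg, (rfl | hpg), hh, hc, rfl⟩)
        · exact Or.inl (Or.inl h)
        · exact Or.inl (Or.inr rfl)
        · exact Or.inr ⟨pg, hpg, hh, hc, rfl⟩
    · rw [not_not] at h1
      constructor
      · rintro (h | ⟨pg, hm, rest⟩)
        · exact Or.inl h
        · exact Or.inr ⟨pg, Or.inr hm, rest⟩
      · rintro (h | ⟨pg, (rfl | hpg), hh, hc, rfl⟩)
        · exact Or.inl h
        · exact absurd hc h2
        · exact Or.inr ⟨pg, hpg, hh, hc, rfl⟩

theorem pv_nodup_innerA (window b : Int) (l : List (Int × String)) (s : PySem.Set Int)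
    (hs : s.Nodup) :
    (l.foldl (fun s pg =>
        if pg.2 ≠ "h" then s
        else if min |pg.1 - b| |pg.1 - (b + 1)| ≤ window
          then PySem.Set.add s pg.1 else s) s).Nodup := by
  induction l generalizing s with
  | nil => simpa
  | cons a l ih =>
    simp only [List.foldl_cons]
    apply ih
    split_ifs <;> first | exact hs | exact PySem.Set.nodup_add _ _ hs

theorem pv_mem_outerA (window : Int) (l : List (Int × String)) (bs : List Int)
    (s : PySem.Set Int) (x : Int) :
    (x ∈ bs.foldl (fun s boundary =>
        l.foldl (fun s pg =>
          if pg.2 ≠ "h" then s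
          else if min |pg.1 - boundary| |pg.1 - (boundary + 1)| ≤ window
            then PySem.Set.add s pg.1 else s) s) s) ↔
    x ∈ s ∨ ∃ b ∈ bs, ∃ pg ∈ l, pg.2 = "h" ∧ min |pg.1 - b| |pg.1 - (b + 1)| ≤ window ∧ x = pg.1 := by
  induction bs generalizing s with
  | nil => simp
  | cons b bs ih =>
    simp only [List.foldl_cons, ih, pv_mem_innerA, List.mem_cons]
    constructor
    · rintro ((h | ⟨pg, hm, rest⟩) | ⟨b', hb', rest⟩)
      · exact Or.inl h
      · exact Or.inr ⟨b, Or.inl rfl, pg, hm, rest⟩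
      · exact Or.inr ⟨b', Or.inr hb', rest⟩
    · rintro (h | ⟨b', (rfl | hb'), rest⟩)
      · exact Or.inl (Or.inl h)
      · exact Or.inl (Or.inr rest)
      · exact Or.inr ⟨b', hb', rest⟩

theorem pv_nodup_outerA (window : Int) (l : List (Int × String)) (bs : List Int)
    (s : PySem.Set Int) (hs : s.Nodup) :
    (bs.foldl (fun s boundary =>
        l.foldl (fun s pg =>
          if pg.2 ≠ "h" then s
          else if min |pg.1 - boundary| |pg.1 - (boundary + 1)| ≤ window
            then PySem.Set.add s pg.1 else s) s) s).Nodup := by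
  induction bs generalizing s with
  | nil => simpa
  | cons b bs ih =>
    simp only [List.foldl_cons]
    exact ih _ (pv_nodup_innerA window b l s hs)

theorem pv_A_count (sequence : List String) (window : Int) (bs : List Int) :
    ((bs.foldl (fun s boundary =>
        (PySem.List.enumerate sequence).foldl (fun s pg =>
          if pg.2 ≠ "h" then s
          else if min |pg.1 - boundary| |pg.1 - (boundary + 1)| ≤ window
            then PySem.Set.add s pg.1 else s) s) (PySem.Set.empty : PySem.Set Int)).length)
    = (PySem.List.enumerate sequence).countP (pvQ bs window) := by
  set l := PySem.List.enumerate sequence with hl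
  set F := bs.foldl (fun s boundary =>
        l.foldl (fun s pg =>
          if pg.2 ≠ "h" then s
          else if min |pg.1 - boundary| |pg.1 - (boundary + 1)| ≤ window
            then PySem.Set.add s pg.1 else s) s) (PySem.Set.empty : PySem.Set Int) with hF
  have hnF : F.Nodup := pv_nodup_outerA window l bs PySem.Set.empty (by simp [PySem.Set.empty])
  have hnL : (((l.filter (pvQ bs window)).map (·.1)) : List Int).Nodup := by
    have hsub : List.Sublist ((l.filter (pvQ bs window)).map (·.1)) (l.map (·.1)) :=
      List.Sublist.map _ List.filter_sublist
    have : (l.map (·.1)).Nodup := by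
      rw [hl, PySem.List.map_fst_enumerate]
      exact PySem.List.nodup_pyRange_one _ _
    exact this.sublist hsub
  have hmem : ∀ x : Int, x ∈ F ↔ x ∈ (l.filter (pvQ bs window)).map (·.1) := by
    intro x
    rw [hF, pv_mem_outerA]
    simp only [List.mem_map, List.mem_filter, PySem.Set.empty, List.not_mem_nil, false_or]
    constructor
    · rintro ⟨b, hb, pg, hpg, hh, hc, rfl⟩
      refine ⟨pg, ⟨hpg, ?_⟩, rfl⟩
      simp only [pvQ, Bool.and_eq_true, beq_iff_eq, List.any_eq_true, decide_eq_true_eq]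
      exact ⟨hh, b, hb, ((pv_near_iff pg.1 b window).mp hc).1, ((pv_near_iff pg.1 b window).mp hc).2⟩
    · rintro ⟨pg, ⟨hpg, hq⟩, rfl⟩
      simp only [pvQ, Bool.and_eq_true, beq_iff_eq, List.any_eq_true, decide_eq_true_eq] at hq
      obtain ⟨hh, b, hb, h1, h2⟩ := hq
      exact ⟨b, hb, pg, hpg, hh, (pv_near_iff pg.1 b window).mpr ⟨h1, h2⟩, rfl⟩
  have hperm := (List.perm_ext_iff_of_nodup hnF hnL).mpr hmem
  rw [List.countP_eq_length_filter, ← List.length_map (f := (·.1 : Int × String → Int))]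
  exact hperm.length_eq

-- ----- B side: the two-pointer pass counts the same positions -----

theorem pv_advance_spec (bs : List Int) (t : Int) (j : Nat)
    (hj : ∀ i (h : i < bs.length), i < j → bs[i] < t) :
    j ≤ pvAdvance bs t j ∧
    (∀ i (h : i < bs.length), i < pvAdvance bs t j → bs[i] < t) ∧
    (∀ h : pvAdvance bs t j < bs.length, t ≤ bs[pvAdvance bs t j]) := by
  fun_induction pvAdvance bs t j with
  | case1 j h hb ih =>
    have hj' : ∀ i (hi : i < bs.length), i < j + 1 → bs[i] < t := by
      intro i hi hlt
      rcases Nat.lt_succ_iff_lt_or_eq.mp hlt with h' | rfl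
      · exact hj i hi h'
      · exact hb
    obtain ⟨h1, h2, h3⟩ := ih hj'
    exact ⟨Nat.le_of_succ_le h1, h2, h3⟩
  | case2 j h hb =>
    exact ⟨le_refl _, hj, fun _ => not_lt.mp hb⟩
  | case3 j h =>
    exact ⟨le_refl _, hj, fun hlt => absurd hlt h⟩

theorem pv_guard_iff (bs : List Int) (hsort : bs.Pairwise (· < ·)) (t hi : Int) (j' : Nat)
    (h1 : ∀ i (h : i < bs.length), i < j' → bs[i] < t)
    (h2 : ∀ h : j' < bs.length, t ≤ bs[j']) :
    (j' < bs.length ∧ PySem.List.pyGetD bs (j' : Int) 0 ≤ hi) ↔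
    ∃ b ∈ bs, t ≤ b ∧ b ≤ hi := by
  have hmono := List.pairwise_iff_getElem.mp hsort
  constructor
  · rintro ⟨hlt, hle⟩
    rw [PySem.List.pyGetD_natCast, List.getD_eq_getElem _ _ hlt] at hle
    exact ⟨bs[j'], List.getElem_mem hlt, h2 hlt, hle⟩
  · rintro ⟨b, hb, hbt, hbhi⟩
    obtain ⟨i, hilen, rfl⟩ := List.getElem_of_mem hb
    have hij : j' ≤ i := by
      by_contra hc
      exact absurd (h1 i hilen (not_le.mp hc)) (not_lt.mpr hbt)
    have hjlen : j' < bs.length := lt_of_le_of_lt hij hilen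
    refine ⟨hjlen, ?_⟩
    rw [PySem.List.pyGetD_natCast, List.getD_eq_getElem _ _ hjlen]
    rcases Nat.lt_or_ge j' i with h | h
    · exact le_trans (le_of_lt (hmono j' i hjlen hilen h)) hbhi
    · have : j' = i := le_antisymm hij h
      subst this; exact hbhi

theorem pv_loopB (bs : List Int) (hsort : bs.Pairwise (· < ·)) (w : Int)
    (xs : List String) (p0 : Int) (c : Int) (j : Nat)
    (hinv : ∀ i (h : i < bs.length), i < j → bs[i] < p0 - 1 - w) :
    ((PySem.List.enumerate xs p0).foldl (fun st pg =>
        let j := pvAdvance bs (pg.1 - 1 - w) st.2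
        if pg.2 == "h" && decide (j < bs.length) &&
           decide (PySem.List.pyGetD bs (j : Int) 0 ≤ pg.1 + w)
        then (st.1 + 1, j) else (st.1, j)) (c, j)).1
    = c + ((PySem.List.enumerate xs p0).countP (pvQ bs w) : Int) := by
  induction xs generalizing p0 c j with
  | nil => simp [PySem.List.enumerate]
  | cons x xs ih =>
    rw [PySem.List.enumerate_cons, List.foldl_cons, List.countP_cons]
    obtain ⟨ha1, ha2, ha3⟩ := pv_advance_spec bs (p0 - 1 - w) j hinv
    dsimp only
    set j' := pvAdvance bs (p0 - 1 - w) j with hj'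
    have hg := pv_guard_iff bs hsort (p0 - 1 - w) (p0 + w) j' ha2 ha3
    have hinv' : ∀ i (h : i < bs.length), i < j' → bs[i] < (p0 + 1) - 1 - w := by
      intro i hi hlt; exact lt_trans (ha2 i hi hlt) (by omega)
    have hQ : (pvQ bs w (p0, x) = true) ↔
        ((x == "h" && decide (j' < bs.length) &&
          decide (PySem.List.pyGetD bs (j' : Int) 0 ≤ p0 + w)) = true) := by
      simp only [pvQ, Bool.and_eq_true, beq_iff_eq, List.any_eq_true, decide_eq_true_eq]
      constructor
      · rintro ⟨hh, b, hb, hc1, hc2⟩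
        have := hg.mpr ⟨b, hb, by omega, by omega⟩
        exact ⟨⟨hh, this.1⟩, this.2⟩
      · rintro ⟨⟨hh, hlt⟩, hle⟩
        obtain ⟨b, hb, hc1, hc2⟩ := hg.mp ⟨hlt, hle⟩
        exact ⟨hh, b, hb, by omega, by omega⟩
    by_cases hc : (x == "h" && decide (j' < bs.length) &&
          decide (PySem.List.pyGetD bs (j' : Int) 0 ≤ p0 + w)) = true
    · rw [if_pos hc, ih (p0 + 1) (c + 1) j' hinv']
      have : pvQ bs w (p0, x) = true := hQ.mpr hc
      rw [this]
      simp only [if_pos trivial]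
      push_cast
      ring
    · rw [if_neg hc, ih (p0 + 1) c j' hinv']
      have : pvQ bs w (p0, x) = false := by
        rcases Bool.eq_false_or_eq_true (pvQ bs w (p0, x)) with h | h
        · exact absurd (hQ.mp h) hc
        · exact h
      rw [this]
      simp

-- ===== VERDICT (by name: the statement is the Claim_ definition above) =====
theorem count_hadamards_near_boundaries_spec : Claim_equal_count_hadamards_near_boundaries := by
  intro sequence window _
  unfold Spec_count_hadamards_near_boundaries count_hadamards_near_boundaries
    count_hadamards_near_boundaries_alt
  dsimp only
  rw [pv_bs_eq]
  set bsA := (PySem.List.pyRange 0 ((sequence.length : Int) - 1)).filter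
    (fun index => pvGateClassA (PySem.List.pyGetD sequence index "") !=
                  pvGateClassA (PySem.List.pyGetD sequence (index + 1) "")) with hbsA
  have hsort : bsA.Pairwise (· < ·) :=
    List.Pairwise.filter _ (PySem.List.pairwise_lt_pyRange_one 0 _)
  have hB := pv_loopB bsA hsort window sequence 0 0 0
    (fun i hi h => absurd h (Nat.not_lt_zero i))
  rw [hB]
  by_cases hb : bsA = []
  · rw [if_pos hb, hb]
    have hfalse : (pvQ [] window) = fun _ => false := by
      funext pg; simp [pvQ]
    rw [hfalse]
    simp
  · rw [if_neg hb, pv_A_count]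
    omega
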